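-- pv_equiv track=rewrite | github.com/GamingVj/first-repo | Programs/python pro/TOC/consecutive one.py | is_accepted
-- ===== SOURCE A (Python) =====
-- def is_accepted(input_string):
--     state = 'q0'
--
--     for symbol in input_string:
--         if state == 'q0':
--             if symbol == '1':
--                 state = 'q1'
--         elif state == 'q1':
--             if symbol == '1':
--                 state = 'q2'
--             elif symbol == '0':
--                 state = 'q0'
--         elif state == 'q2':
--             if symbol == '1':
--                 state = 'q_accept'
--             elif symbol == '0':
--                 state = 'q0'
--         elif state == 'q_accept':
--             break
--
--     return state == 'q_accept'
-- ===== SOURCE B (Python) =====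
-- def is_accepted(input_string):
--     bits = ''.join(c for c in input_string if c in '01')
--     return '111' in bits
-- ===== Notes on version B (the rewrite author's own statement) =====
-- stated objective: simpler
-- what changed: Replaces the one-pass named-state DFA with two staged passes: first project the string onto its '0'/'1' symbols (the DFA ignores everything else), then a plain substring test '111' in the projection.
import Mathlib
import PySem

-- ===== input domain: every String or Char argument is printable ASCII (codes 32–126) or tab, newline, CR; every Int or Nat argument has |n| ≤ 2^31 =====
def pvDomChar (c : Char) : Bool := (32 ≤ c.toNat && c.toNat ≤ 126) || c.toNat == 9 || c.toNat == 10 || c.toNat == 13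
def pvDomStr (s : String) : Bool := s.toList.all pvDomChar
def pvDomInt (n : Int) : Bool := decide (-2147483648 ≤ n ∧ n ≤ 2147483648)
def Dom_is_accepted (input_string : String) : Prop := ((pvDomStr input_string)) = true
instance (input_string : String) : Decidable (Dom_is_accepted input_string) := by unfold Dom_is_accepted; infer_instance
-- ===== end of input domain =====

-- B replaces the one-pass named-state DFA with two staged passes: project onto the '0'/'1'
-- symbols, then a substring test '111' on the projection (objective: simpler).


-- ===== PORT A =====
-- the for-loop over the string with the named state; the 'break' in state q_accept
-- is the early exit returning the current state unchanged
def pvALoop : List Char → String → String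
  | [], st => st
  | c :: cs, st =>
    if st == "q0" then
      pvALoop cs (if c == '1' then "q1" else st)
    else if st == "q1" then
      pvALoop cs (if c == '1' then "q2" else if c == '0' then "q0" else st)
    else if st == "q2" then
      pvALoop cs (if c == '1' then "q_accept" else if c == '0' then "q0" else st)
    else if st == "q_accept" then
      st   -- break
    else
      pvALoop cs st

def is_accepted (input_string : String) : Bool :=
  pvALoop input_string.toList "q0" == "q_accept"

-- ===== PORT B =====
-- bits = ''.join(c for c in input_string if c in '01'); return '111' in bits
def is_accepted_alt (input_string : String) : Bool :=
  PySem.Chars.isIn ['1', '1', '1']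
    (input_string.toList.filter (fun c => c == '0' || c == '1'))

-- ===== PRECONDITION & SPEC =====
def Spec_is_accepted (input_string : String) (out : Bool) : Prop := out = is_accepted_alt input_string
instance (input_string : String) (out : Bool) : Decidable (Spec_is_accepted input_string out) := by unfold Spec_is_accepted; infer_instance

-- ===== CLAIM (what is proved, stated in full; the proofs are below) =====
def Claim_equal_is_accepted : Prop := ∀ (input_string : String), Dom_is_accepted input_string → Spec_is_accepted input_string (is_accepted input_string)

-- ===== LEMMAS AND PROOFS =====
theorem pvALoop_accept : ∀ cs : List Char, pvALoop cs "q_accept" = "q_accept" := by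
  intro cs; cases cs <;> simp [pvALoop]

-- characters other than '0'/'1' never change the state: the loop factors through the projection
theorem pvALoop_filter : ∀ (cs : List Char) (st : String),
    pvALoop cs st = pvALoop (cs.filter (fun c => c == '0' || c == '1')) st := by
  intro cs
  induction cs with
  | nil => intro st; rfl
  | cons c cs ih =>
    intro st
    by_cases hb : (c == '0' || c == '1') = true
    · simp only [List.filter_cons, hb, if_pos]
      by_cases h0 : st = "q0"
      · subst h0; simp [pvALoop, ih]
      · by_cases h1 : st = "q1"
        · subst h1; simp [pvALoop, ih]
        · by_cases h2 : st = "q2"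
          · subst h2; simp [pvALoop, ih]
          · by_cases ha : st = "q_accept"
            · subst ha; simp [pvALoop]
            · simp [pvALoop, h0, h1, h2, ha, ih]
    · have hc0 : ¬ (c = '0') := by intro h; simp [h] at hb
      have hc1 : ¬ (c = '1') := by intro h; simp [h] at hb
      simp only [List.filter_cons, hb, if_neg, Bool.false_eq_true, not_false_iff]
      by_cases h0 : st = "q0"
      · subst h0; simp [pvALoop, hc1, ih]
      · by_cases h1 : st = "q1"
        · subst h1; simp [pvALoop, hc0, hc1, ih]
        · by_cases h2 : st = "q2"
          · subst h2; simp [pvALoop, hc0, hc1, ih]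
          · by_cases ha : st = "q_accept"
            · subst ha; simp [pvALoop, pvALoop_accept]
            · simp [pvALoop, h0, h1, h2, ha, ih]

def pvStateOf (k : Nat) : String :=
  if k = 0 then "q0" else if k = 1 then "q1" else "q2"

-- on binary lists, the DFA (with k consecutive 1s already seen) accepts iff the list opens
-- with 3-k ones or contains '111'
theorem pv_accept_iff : ∀ (bs : List Char), (∀ c ∈ bs, c = '0' ∨ c = '1') →
    ∀ k : Nat, k ≤ 2 →
    (pvALoop bs (pvStateOf k) = "q_accept" ↔
      (List.replicate (3 - k) '1' <+: bs ∨ ['1', '1', '1'] <:+: bs)) := by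
  intro bs
  induction bs with
  | nil =>
    intro _ k hk
    interval_cases k <;> simp [pvALoop, pvStateOf, List.replicate]
  | cons c cs ih =>
    intro hbin k hk
    have hcs : ∀ x ∈ cs, x = '0' ∨ x = '1' := fun x hx => hbin x (List.mem_cons_of_mem _ hx)
    rcases hbin c (List.mem_cons_self) with hc | hc <;> subst hc
    · -- '0' resets the state to q0
      have h := ih hcs 0 (by norm_num)
      rw [show pvStateOf 0 = "q0" from rfl] at h
      have hstep : ∀ K : Nat, K ≤ 2 → pvALoop ('0' :: cs) (pvStateOf K) = pvALoop cs "q0" := by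
        intro K hK
        interval_cases K <;> simp [pvStateOf, pvALoop]
      rw [hstep k hk, h]
      rw [show List.replicate (3 - 0) '1' = ['1','1','1'] from rfl]
      constructor
      · rintro (hp | hi)
        · right; exact List.infix_cons (List.IsPrefix.isInfix hp)
        · right; exact List.infix_cons hi
      · rintro (hp | hi)
        · exfalso
          rcases Nat.exists_eq_succ_of_ne_zero (by omega : 3 - k ≠ 0) with ⟨m, hm⟩
          rw [hm, List.replicate_succ] at hp
          exact absurd (List.cons_prefix_cons.mp hp).1 (by decide)
        · rcases List.infix_cons_iff.mp hi with hp | hi'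
          · exact absurd (List.cons_prefix_cons.mp hp).1 (by decide)
          · right; exact hi'
    · -- '1' advances
      interval_cases k
      · have h := ih hcs 1 (by norm_num)
        rw [show pvStateOf 1 = "q1" from rfl] at h
        rw [show pvStateOf 0 = "q0" from rfl]
        simp only [pvALoop, show ('1' == '1') = true from rfl,
          show ("q0" == "q0") = true from rfl, if_true]
        rw [h]
        rw [show List.replicate (3 - 1) '1' = ['1','1'] from rfl,
            show List.replicate (3 - 0) '1' = ['1','1','1'] from rfl]
        constructor
        · rintro (hp | hi)
          · left; exact List.cons_prefix_cons.mpr ⟨rfl, hp⟩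
          · right; exact List.infix_cons hi
        · rintro (hp | hi)
          · left; exact (List.cons_prefix_cons.mp hp).2
          · rcases List.infix_cons_iff.mp hi with hp | hi'
            · left; exact (List.cons_prefix_cons.mp hp).2
            · right; exact hi'
      · have h := ih hcs 2 (by norm_num)
        rw [show pvStateOf 2 = "q2" from rfl] at h
        rw [show pvStateOf 1 = "q1" from rfl]
        simp only [pvALoop, show ('1' == '1') = true from rfl,
          show ("q1" == "q0") = false from rfl, show ("q1" == "q1") = true from rfl,
          Bool.false_eq_true, if_false, if_true]
        rw [h]
        rw [show List.replicate (3 - 2) '1' = ['1'] from rfl,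
            show List.replicate (3 - 1) '1' = ['1','1'] from rfl]
        constructor
        · rintro (hp | hi)
          · left; exact List.cons_prefix_cons.mpr ⟨rfl, hp⟩
          · right; exact List.infix_cons hi
        · rintro (hp | hi)
          · left; exact (List.cons_prefix_cons.mp hp).2
          · rcases List.infix_cons_iff.mp hi with hp | hi'
            · left
              have h2 : ['1', '1'] <+: cs := (List.cons_prefix_cons.mp hp).2
              have hone : ['1'] <+: ['1', '1'] := ⟨['1'], rfl⟩
              exact hone.trans h2
            · right; exact hi'
      · rw [show pvStateOf 2 = "q2" from rfl]
        simp only [pvALoop, show ('1' == '1') = true from rfl,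
          show ("q2" == "q0") = false from rfl, show ("q2" == "q1") = false from rfl,
          show ("q2" == "q2") = true from rfl, Bool.false_eq_true, if_false, if_true]
        rw [pvALoop_accept]
        rw [show List.replicate (3 - 2) '1' = ['1'] from rfl]
        simp

-- ===== VERDICT (by name: the statement is the Claim_ definition above) =====
theorem is_accepted_spec : Claim_equal_is_accepted := by
  intro s _
  unfold Spec_is_accepted is_accepted is_accepted_alt
  rw [pvALoop_filter]
  set bs := s.toList.filter (fun c => c == '0' || c == '1') with hbs
  have hbin : ∀ c ∈ bs, c = '0' ∨ c = '1' := by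
    intro c hc
    have := List.of_mem_filter hc
    rcases Bool.or_eq_true_iff.mp this with h | h
    · left; exact (beq_iff_eq).mp h
    · right; exact (beq_iff_eq).mp h
  have h := pv_accept_iff bs hbin 0 (by norm_num)
  rw [show pvStateOf 0 = "q0" from rfl] at h
  rw [show List.replicate (3 - 0) '1' = ['1','1','1'] from rfl] at h
  apply Bool.eq_iff_iff.mpr
  rw [beq_iff_eq, PySem.Chars.isIn_iff_infix]
  rw [h]
  constructor
  · rintro (hp | hi)
    · exact List.IsPrefix.isInfix hp
    · exact hi
  · intro hi; right; exact hi
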